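-- pv_equiv track=rewrite | github.com/ideolog/tgnews | tgnews.py | break_article_into_words
-- ===== SOURCE A (Python) =====
-- def break_article_into_words(message, letters_and_space, length=0):
--     message = message.upper()
--     message = remove_non_letters(message, letters_and_space)
--     possible_words = message.split()
--     matched_words = {}
--     for word in possible_words:
--         if len(word) >= length:
--             matched_words[word] = None
--     return matched_words
--
-- def remove_non_letters(message, letters_and_space):
--     letters_only = []
--
--     for symbol in message:
--         if symbol in letters_and_space:
--             letters_only.append(symbol)
--
--     return ''.join(letters_only)
-- ===== SOURCE B (Python) =====
-- def break_article_into_words(message, letters_and_space, length=0):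
--     matched_words = {}
--     buf = []
--     for symbol in message.upper():
--         if symbol in letters_and_space:
--             if symbol.isspace():
--                 if buf and len(buf) >= length:
--                     matched_words[''.join(buf)] = None
--                 buf = []
--             else:
--                 buf.append(symbol)
--     if buf and len(buf) >= length:
--         matched_words[''.join(buf)] = None
--     return matched_words
-- ===== Notes on version B (the rewrite author's own statement) =====
-- stated objective: simpler
-- what changed: B fuses A's three passes (build a filtered copy via remove_non_letters, split() it, then filter-and-insert the words) into one pass over message.upper() with a current-word buffer that is flushed at kept whitespace.
import Mathlib
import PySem

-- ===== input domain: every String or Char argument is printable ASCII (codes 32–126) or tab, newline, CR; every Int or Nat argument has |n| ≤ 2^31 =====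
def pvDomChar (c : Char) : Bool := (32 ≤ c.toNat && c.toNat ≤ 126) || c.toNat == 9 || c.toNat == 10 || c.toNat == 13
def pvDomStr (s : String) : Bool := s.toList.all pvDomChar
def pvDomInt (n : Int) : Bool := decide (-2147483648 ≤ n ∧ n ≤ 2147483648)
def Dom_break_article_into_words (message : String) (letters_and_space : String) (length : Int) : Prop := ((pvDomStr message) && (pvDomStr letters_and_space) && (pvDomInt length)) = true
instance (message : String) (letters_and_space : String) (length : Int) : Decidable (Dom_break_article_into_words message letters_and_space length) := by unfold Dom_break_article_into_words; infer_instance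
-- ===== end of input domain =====

-- B fuses A's three passes (remove_non_letters, split(), filter loop) into one pass
-- over message.upper() with a current-word buffer (objective: simpler decomposition).

-- ===== PORT A =====
-- remove_non_letters: append kept symbols one by one, then ''.join
def removeNonLetters (message : List Char) (letters_and_space : List Char) : List Char :=
  message.foldl (fun letters_only symbol =>
    if letters_and_space.contains symbol then letters_only ++ [symbol] else letters_only) []

def break_article_into_words (message : String) (letters_and_space : String) (length : Int) : List (String × Option Int) :=
  ((PySem.Chars.split₀
      (removeNonLetters (PySem.Chars.upper message.toList) letters_and_space.toList)).foldl (fun matched_words word =>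
    if length ≤ (word.length : Int) then matched_words.insert (String.ofList word) none
    else matched_words) PySem.Dict.empty).items

-- ===== PORT B =====
-- flush the buffer: emit the buffered word if non-empty and long enough
def bFlush (length : Int) (d : PySem.Dict String (Option Int)) (buf : List Char) :
    PySem.Dict String (Option Int) :=
  if buf ≠ [] ∧ length ≤ (buf.length : Int) then d.insert (String.ofList buf) none else d

-- the single pass: state = (dict so far, current-word buffer)
def bLoop (letters_and_space : List Char) (length : Int) :
    List Char → PySem.Dict String (Option Int) → List Char → PySem.Dict String (Option Int)
  | [], d, buf => bFlush length d buf
  | symbol :: rest, d, buf =>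
    if letters_and_space.contains symbol then
      if PySem.Chars.isspace symbol then
        bLoop letters_and_space length rest (bFlush length d buf) []
      else
        bLoop letters_and_space length rest d (buf ++ [symbol])
    else
      bLoop letters_and_space length rest d buf

def break_article_into_words_alt (message : String) (letters_and_space : String) (length : Int) : List (String × Option Int) :=
  (bLoop letters_and_space.toList length (PySem.Chars.upper message.toList) PySem.Dict.empty []).items

-- ===== PRECONDITION & SPEC =====
def Spec_break_article_into_words (message : String) (letters_and_space : String) (length : Int) (out : List (String × Option Int)) : Prop := out = break_article_into_words_alt message letters_and_space length
instance (message : String) (letters_and_space : String) (length : Int) (out : List (String × Option Int)) : Decidable (Spec_break_article_into_words message letters_and_space length out) := by unfold Spec_break_article_into_words; infer_instance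

-- ===== CLAIM (what is proved, stated in full; the proofs are below) =====
def Claim_equal_break_article_into_words : Prop := ∀ (message : String) (letters_and_space : String) (length : Int), Dom_break_article_into_words message letters_and_space length → Spec_break_article_into_words message letters_and_space length (break_article_into_words message letters_and_space length)

-- ===== LEMMAS AND PROOFS =====

-- split₀.go consumes a space-free prefix into its current-word accumulator
lemma go_append_nospace (buf : List Char) (h : ∀ c ∈ buf, PySem.Chars.isspace c = false) :
    ∀ (s cur : List Char) (acc : List (List Char)),
    PySem.Chars.split₀.go (buf ++ s) cur acc = PySem.Chars.split₀.go s (buf.reverse ++ cur) acc := by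
  induction buf with
  | nil => intro s cur acc; simp
  | cons b bs ih =>
    intro s cur acc
    have hb : PySem.Chars.isspace b = false := h b (List.mem_cons_self)
    simp only [List.cons_append, PySem.Chars.split₀.go, hb, Bool.false_eq_true, if_false]
    rw [ih (fun c hc => h c (List.mem_cons_of_mem _ hc)) s (b :: cur) acc]
    simp

-- split₀.go's word accumulator is a pure prefix
lemma go_acc (s : List Char) : ∀ (cur : List Char) (acc : List (List Char)),
    PySem.Chars.split₀.go s cur acc = acc.reverse ++ PySem.Chars.split₀.go s cur [] := by
  induction s with
  | nil =>
    intro cur acc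
    simp only [PySem.Chars.split₀.go]
    by_cases hc : cur.isEmpty <;> simp [hc]
  | cons c rest ih =>
    intro cur acc
    by_cases hsp : PySem.Chars.isspace c
    · by_cases hc : cur.isEmpty = true
      · simp only [PySem.Chars.split₀.go, hsp, hc, if_true]
        exact ih [] acc
      · simp only [PySem.Chars.split₀.go, hsp, hc, if_true, Bool.false_eq_true, if_false]
        rw [ih [] (cur.reverse :: acc), ih [] [cur.reverse]]
        simp
    · simp only [PySem.Chars.split₀.go, hsp, Bool.false_eq_true, if_false]
      exact ih (c :: cur) acc

-- split₀ of a space-free string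
lemma split₀_nospace (buf : List Char) (h : ∀ c ∈ buf, PySem.Chars.isspace c = false) :
    PySem.Chars.split₀ buf = if buf = [] then [] else [buf] := by
  unfold PySem.Chars.split₀
  rw [show buf = buf ++ [] by simp, go_append_nospace buf h [] [] []]
  cases buf with
  | nil => simp [PySem.Chars.split₀.go]
  | cons b bs =>
    simp only [PySem.Chars.split₀.go, List.append_nil]
    simp

-- split₀ of a space-free prefix, a space, then the rest
lemma split₀_prefix_space (buf : List Char) (c : Char) (s : List Char)
    (h : ∀ c ∈ buf, PySem.Chars.isspace c = false) (hc : PySem.Chars.isspace c = true) :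
    PySem.Chars.split₀ (buf ++ c :: s) =
      (if buf = [] then [] else [buf]) ++ PySem.Chars.split₀ s := by
  unfold PySem.Chars.split₀
  rw [go_append_nospace buf h (c :: s) [] []]
  cases buf with
  | nil => simp [PySem.Chars.split₀.go, hc]
  | cons b bs =>
    simp only [PySem.Chars.split₀.go, hc, if_true, List.append_nil]
    have : ((b :: bs).reverse).isEmpty = false := by simp
    rw [this]
    simp only [Bool.false_eq_true, if_false]
    rw [go_acc s [] [(b :: bs).reverse.reverse]]
    simp

-- A's per-word dict update
def aIns (length : Int) (d : PySem.Dict String (Option Int)) (w : List Char) :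
    PySem.Dict String (Option Int) :=
  if length ≤ (w.length : Int) then d.insert (String.ofList w) none else d

-- the loop invariant: B's single pass on (d, buf) equals A's word fold over
-- split₀ of buf followed by the filtered remainder
lemma bLoop_eq (las : List Char) (length : Int) :
    ∀ (cs : List Char) (d : PySem.Dict String (Option Int)) (buf : List Char),
    (∀ c ∈ buf, PySem.Chars.isspace c = false) →
    bLoop las length cs d buf =
      (PySem.Chars.split₀ (buf ++ (cs.filter (fun c => las.contains c)))).foldl (aIns length) d := by
  intro cs
  induction cs with
  | nil =>
    intro d buf h
    rw [List.filter_nil, List.append_nil, split₀_nospace buf h]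
    cases buf with
    | nil => simp [bLoop, bFlush]
    | cons b bs => simp [bLoop, bFlush, aIns]
  | cons c rest ih =>
    intro d buf h
    by_cases hin : las.contains c
    · by_cases hsp : PySem.Chars.isspace c
      · simp only [bLoop, hin, hsp, if_true]
        rw [ih (bFlush length d buf) [] (by simp)]
        rw [List.filter_cons_of_pos hin, split₀_prefix_space buf c _ h hsp,
          List.foldl_append]
        congr 1
        cases buf with
        | nil => simp [bFlush]
        | cons b bs => simp [bFlush, aIns]
      · simp only [bLoop, hin, hsp, if_true, Bool.false_eq_true, if_false]
        rw [ih d (buf ++ [c]) ?_]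
        · rw [List.filter_cons_of_pos hin]
          simp only [List.append_assoc, List.singleton_append]
        · intro x hx
          rcases List.mem_append.mp hx with hx | hx
          · exact h x hx
          · simp only [List.mem_singleton] at hx
            subst hx; simpa using hsp
    · simp only [bLoop, hin, Bool.false_eq_true, if_false]
      rw [ih d buf h, List.filter_cons_of_neg (by simpa using hin)]

-- ===== VERDICT (by name: the statement is the Claim_ definition above) =====
theorem break_article_into_words_spec : Claim_equal_break_article_into_words := by
  intro message letters_and_space length _
  unfold Spec_break_article_into_words break_article_into_words break_article_into_words_alt
  rw [bLoop_eq letters_and_space.toList length (PySem.Chars.upper message.toList)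
      PySem.Dict.empty [] (by simp)]
  congr 1
  unfold removeNonLetters
  rw [show (fun (letters_only : List Char) symbol =>
        if letters_and_space.toList.contains symbol then letters_only ++ [symbol]
        else letters_only) =
      (fun acc x => if letters_and_space.toList.contains x = true then acc ++ [id x] else acc)
    from rfl, PySem.List.foldl_append_if]
  simp only [List.map_id, List.nil_append]
  rw [show (letters_and_space.toList.contains : Char → Bool) =
      (fun c => decide (c ∈ letters_and_space.toList)) from funext fun c => by
    simp [List.contains_eq_mem]]
  rfl
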